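-- pv_equiv track=rewrite | github.com/omattaeus/tchau_preguica | src/models/mobilenet_v2/detect_receipt.py | parse_receipt_text
-- ===== SOURCE A (Python) =====
-- def parse_receipt_text(text):
--     """Extrai valores de quantidade e data do texto extraído."""
--     amount = None
--     date = None
--
--     for line in text.splitlines():
--         if "R$" in line:
--             amount = line.strip()
--         if "/" in line:
--             date = line.strip()
--
--     return {"amount": amount, "date": date}
-- ===== SOURCE B (Python) =====
-- def parse_receipt_text(text):
--     """Extrai valores de quantidade e data do texto extraído."""
--     amount = None
--     date = None
--     for line in reversed(text.splitlines()):
--         if amount is None and "R$" in line: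
--             amount = line.strip()
--         if date is None and "/" in line:
--             date = line.strip()
--         if amount is not None and date is not None:
--             break
--     return {"amount": amount, "date": date}
-- ===== Notes on version B (the rewrite author's own statement) =====
-- stated objective: alternative
-- what changed: B scans the lines in reverse keeping the first match per field and breaks as soon as both the amount and the date are found, instead of A's full forward pass that overwrites on every match.
import Mathlib
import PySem

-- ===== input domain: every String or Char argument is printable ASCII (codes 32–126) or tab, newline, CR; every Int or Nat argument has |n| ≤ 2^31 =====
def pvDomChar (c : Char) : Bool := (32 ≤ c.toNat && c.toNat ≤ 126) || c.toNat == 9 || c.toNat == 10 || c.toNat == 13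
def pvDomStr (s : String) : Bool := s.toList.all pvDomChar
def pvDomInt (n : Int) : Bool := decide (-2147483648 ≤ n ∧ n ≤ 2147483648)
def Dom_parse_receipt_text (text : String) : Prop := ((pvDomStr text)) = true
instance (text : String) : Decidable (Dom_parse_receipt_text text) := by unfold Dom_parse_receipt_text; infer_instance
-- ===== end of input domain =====

-- B replaces A's forward overwrite scan with a reverse scan that keeps the first match per field and exits early once both are found (alternative decomposition; equal cost).


-- ===== PORT A =====
-- A: one forward pass over the lines; a later match overwrites an earlier one.
def pvStepA (st : Option String × Option String) (line : String) :
    Option String × Option String :=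
  let st1 := if PySem.Str.isIn "R$" line then (some (PySem.Str.strip line), st.2) else st
  if PySem.Str.isIn "/" line then (st1.1, some (PySem.Str.strip line)) else st1

def parse_receipt_text (text : String) : List (String × Option String) :=
  let st := (PySem.Str.splitlines text).foldl pvStepA (none, none)
  [("amount", st.1), ("date", st.2)]

-- ===== PORT B =====
-- B: reverse scan keeping the FIRST match per field, breaking once both are set.
def pvLoopB : List String → Option String → Option String → Option String × Option String
  | [], amount, date => (amount, date)
  | line :: rest, amount, date =>
    let amount' := if amount = none ∧ PySem.Str.isIn "R$" line
                   then some (PySem.Str.strip line) else amount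
    let date' := if date = none ∧ PySem.Str.isIn "/" line
                 then some (PySem.Str.strip line) else date
    if amount'.isSome ∧ date'.isSome then (amount', date')
    else pvLoopB rest amount' date'

def parse_receipt_text_alt (text : String) : List (String × Option String) :=
  let st := pvLoopB (PySem.Str.splitlines text).reverse none none
  [("amount", st.1), ("date", st.2)]

-- ===== PRECONDITION & SPEC =====
def Spec_parse_receipt_text (text : String) (out : List (String × Option String)) : Prop := out = parse_receipt_text_alt text
instance (text : String) (out : List (String × Option String)) : Decidable (Spec_parse_receipt_text text out) := by unfold Spec_parse_receipt_text; infer_instance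

-- ===== CLAIM (what is proved, stated in full; the proofs are below) =====
def Claim_equal_parse_receipt_text : Prop := ∀ (text : String), Dom_parse_receipt_text text → Spec_parse_receipt_text text (parse_receipt_text text)

-- ===== LEMMAS AND PROOFS =====

-- characterisation of each side: the first matching line of the reversed list
def pvFindR (ys : List String) : Option String :=
  (ys.find? (fun l => PySem.Str.isIn "R$" l)).map PySem.Str.strip
def pvFindD (ys : List String) : Option String :=
  (ys.find? (fun l => PySem.Str.isIn "/" l)).map PySem.Str.strip

theorem pvLoopB_spec (ys : List String) (a d : Option String) :
    pvLoopB ys a d = (a.orElse (fun _ => pvFindR ys), d.orElse (fun _ => pvFindD ys)) := by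
  induction ys generalizing a d with
  | nil => cases a <;> cases d <;> simp [pvLoopB, pvFindR, pvFindD]
  | cons l rest ih =>
    cases hr : PySem.Str.isIn "R$" l <;> cases hd : PySem.Str.isIn "/" l <;>
      simp at hr hd <;>
        cases a <;> cases d <;>
          simp [pvLoopB, hr, hd, ih, pvFindR, pvFindD, Option.orElse]

theorem pvFoldA_spec (xs : List String) (a d : Option String) :
    xs.foldl pvStepA (a, d) =
      ((pvFindR xs.reverse).orElse (fun _ => a), (pvFindD xs.reverse).orElse (fun _ => d)) := by
  induction xs generalizing a d with
  | nil => cases a <;> cases d <;> simp [pvFindR, pvFindD]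
  | cons l rest ih =>
    simp only [List.foldl_cons, List.reverse_cons]
    cases hr : PySem.Str.isIn "R$" l <;> cases hd : PySem.Str.isIn "/" l <;>
      simp at hr hd <;>
        simp [pvStepA, hr, hd, ih, pvFindR, pvFindD, List.find?_append, Option.orElse] <;>
          cases h1 : (rest.reverse.find? (fun l => PySem.Chars.isIn ['R', '$'] l.toList)) <;>
            cases h2 : (rest.reverse.find? (fun l => PySem.Chars.isIn ['/'] l.toList)) <;>
              simp [h1, h2]

-- ===== VERDICT (by name: the statement is the Claim_ definition above) =====
theorem parse_receipt_text_spec : Claim_equal_parse_receipt_text := by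
  intro text _
  unfold Spec_parse_receipt_text parse_receipt_text parse_receipt_text_alt
  rw [pvLoopB_spec, pvFoldA_spec]
  cases pvFindR (PySem.Str.splitlines text).reverse <;>
    cases pvFindD (PySem.Str.splitlines text).reverse <;>
      simp [Option.orElse]
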